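-- pv_equiv track=rewrite | github.com/fhehli/aoc24 | 22.py | part_one
-- ===== SOURCE A (Python) =====
-- def part_one(inp):
--     def simulate(n, steps):
--         for _ in range(steps):
--             n = (n ^ (n * 64)) % 16777216
--             n = (n ^ (n // 32)) % 16777216
--             n = (n ^ (n * 2048)) % 16777216
--         return n
--
--     return sum(simulate(n, 2000) for n in inp)
-- ===== SOURCE B (Python) =====
-- def part_one(inp):
--     MOD = 16777216
--     MASK = MOD - 1
--
--     def step(v):
--         v = (v ^ (v << 6)) & MASK
--         v = (v ^ (v >> 5)) & MASK
--         return (v ^ (v << 11)) & MASK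
--
--     def apply(m, v):
--         r = 0
--         for i in range(24):
--             if (v >> i) & 1:
--                 r ^= m[i]
--         return r
--
--     def matmul(a, b):
--         return [apply(a, c) for c in b]
--
--     base = [step(1 << i) for i in range(24)]
--     p = [1 << i for i in range(24)]
--     e = 2000
--     while e:
--         if e & 1:
--             p = matmul(base, p)
--         base = matmul(base, base)
--         e >>= 1
--
--     return sum(apply(p, n % MOD) for n in inp)
-- ===== Notes on version B (the rewrite author's own statement) =====
-- stated objective: faster
-- what changed: The 2000-step PRNG update is xor-linear on 24-bit words, so B precomputes the 24x24 GF(2) step matrix raised to the 2000th power by repeated squaring and reduces each seed to one 24-bit matrix-vector multiply, instead of A's 2000 sequential shift/xor/mod iterations per seed.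
import Mathlib
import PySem

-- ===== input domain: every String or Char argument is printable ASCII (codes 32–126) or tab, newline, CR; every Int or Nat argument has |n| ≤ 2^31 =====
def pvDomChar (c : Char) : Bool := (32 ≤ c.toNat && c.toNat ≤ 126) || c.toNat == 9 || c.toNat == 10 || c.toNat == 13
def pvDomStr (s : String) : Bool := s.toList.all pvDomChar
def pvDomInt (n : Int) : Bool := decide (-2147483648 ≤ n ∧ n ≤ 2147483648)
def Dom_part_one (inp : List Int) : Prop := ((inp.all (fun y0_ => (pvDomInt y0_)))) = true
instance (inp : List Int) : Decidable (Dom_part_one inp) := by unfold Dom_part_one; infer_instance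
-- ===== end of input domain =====

-- B replaces A's 2000 sequential PRNG steps per seed by one precomputed GF(2) matrix (the step map
-- is xor-linear on 24-bit words): matrix^2000 by repeated squaring, then one 24-bit matrix-vector
-- multiply per seed; objective: faster (measured).

-- ===== PORT A =====
-- A's nested helper 'simulate(n, steps)': loop 'for _ in range(steps)' over the three update lines
def part_one_simulate (n : Int) (steps : Int) : Int :=
  (PySem.List.pyRange 0 steps 1).foldl
    (fun n _ =>
      let n1 := PySem.Int.mod (PySem.Int.bxor n (n * 64)) 16777216
      let n2 := PySem.Int.mod (PySem.Int.bxor n1 (PySem.Int.floordiv n1 32)) 16777216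
      PySem.Int.mod (PySem.Int.bxor n2 (n2 * 2048)) 16777216)
    n

def part_one (inp : List Int) : Int :=
  (inp.map (fun n => part_one_simulate n 2000)).sum

-- ===== PORT B =====
-- Source B's 'step(v)': values are nonnegative 24-bit words, so Nat with <<< >>> &&& ^^^ is exact
def altStep (v : Nat) : Nat :=
  let v1 := (v ^^^ (v <<< 6)) &&& 16777215
  let v2 := (v1 ^^^ (v1 >>> 5)) &&& 16777215
  (v2 ^^^ (v2 <<< 11)) &&& 16777215

-- Source B's 'apply(m, v)': for i in range(24): if (v >> i) & 1: r ^= m[i]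
-- (m[i] as m.getD i 0: every matrix in Source B has exactly 24 columns, so the default is never taken)
def altApply (m : List Nat) (v : Nat) : Nat :=
  (List.range 24).foldl (fun r i => if (v >>> i) &&& 1 == 1 then r ^^^ m.getD i 0 else r) 0

-- Source B's 'matmul(a, b)'
def altMatmul (a b : List Nat) : List Nat := b.map (fun c => altApply a c)

-- Source B's 'while e:' binary-exponentiation loop
def altPowLoop (base p : List Nat) (e : Nat) : List Nat :=
  if e = 0 then p
  else altPowLoop (altMatmul base base) (if e &&& 1 == 1 then altMatmul base p else p) (e >>> 1)
  termination_by e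
  decreasing_by simp only [Nat.shiftRight_eq_div_pow, pow_one]; omega

def part_one_alt (inp : List Int) : Int :=
  let base := (List.range 24).map (fun i => altStep (1 <<< i))
  let p := altPowLoop base ((List.range 24).map (fun i => (1 : Nat) <<< i)) 2000
  (inp.map (fun n => ((altApply p (PySem.Int.mod n 16777216).toNat : Nat) : Int))).sum

-- ===== PRECONDITION & SPEC =====
def Spec_part_one (inp : List Int) (out : Int) : Prop := out = part_one_alt inp
instance (inp : List Int) (out : Int) : Decidable (Spec_part_one inp out) := by unfold Spec_part_one; infer_instance

-- ===== CLAIM (what is proved, stated in full; the proofs are below) =====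
def Claim_equal_part_one : Prop := ∀ (inp : List Int), Dom_part_one inp → Spec_part_one inp (part_one inp)

-- ===== LEMMAS AND PROOFS =====

theorem cond_eq (v i : Nat) : ((v >>> i) &&& 1 == 1) = v.testBit i := by
  simp [Nat.testBit, Nat.and_comm]

def appk (m : List Nat) (v : Nat) (k : Nat) : Nat :=
  (List.range k).foldl (fun r i => if v.testBit i then r ^^^ m.getD i 0 else r) 0

theorem appk_succ (m : List Nat) (v k : Nat) :
    appk m v (k + 1) = if v.testBit k then appk m v k ^^^ m.getD k 0 else appk m v k := by
  unfold appk
  rw [List.range_succ, List.foldl_append]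
  simp

theorem appk_zero_v (m : List Nat) (k : Nat) : appk m 0 k = 0 := by
  induction k with
  | zero => rfl
  | succ k ih => rw [appk_succ]; simp [ih]

theorem appk_xor (m : List Nat) (x y k : Nat) :
    appk m (x ^^^ y) k = appk m x k ^^^ appk m y k := by
  induction k with
  | zero => simp [appk]
  | succ k ih =>
    rw [appk_succ, appk_succ, appk_succ, Nat.testBit_xor, ih]
    cases hx : x.testBit k <;> cases hy : y.testBit k <;>
      simp [Nat.xor_assoc, Nat.xor_comm, Nat.xor_left_comm]

theorem appk_two_pow (m : List Nat) (i k : Nat) :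
    appk m (2 ^ i) k = if i < k then m.getD i 0 else 0 := by
  induction k with
  | zero => simp [appk]
  | succ k ih =>
    rw [appk_succ, Nat.testBit_two_pow, ih]
    rcases Nat.lt_trichotomy i k with h|h|h
    · simp [h, Nat.ne_of_lt h, Nat.lt_succ_of_lt h]
    · subst h; simp
    · have h1 : ¬ i < k := by omega
      have h2 : ¬ i = k := by omega
      have h3 : ¬ i < k + 1 := by omega
      simp [h1, h2, h3]

theorem stageL_lin (s x y : Nat) :
    (((x ^^^ y) ^^^ ((x ^^^ y) <<< s)) &&& 16777215)
      = ((x ^^^ (x <<< s)) &&& 16777215) ^^^ ((y ^^^ (y <<< s)) &&& 16777215) := by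
  apply Nat.eq_of_testBit_eq
  intro i
  simp [Nat.testBit_and, Nat.testBit_xor, Nat.testBit_shiftLeft]
  cases hx : x.testBit i <;> cases hy : y.testBit i <;>
    cases hx2 : x.testBit (i - s) <;> cases hy2 : y.testBit (i - s) <;>
    cases h : decide (s ≤ i) <;> simp_all
theorem stageR_lin (x y : Nat) :
    (((x ^^^ y) ^^^ ((x ^^^ y) >>> 5)) &&& 16777215)
      = ((x ^^^ (x >>> 5)) &&& 16777215) ^^^ ((y ^^^ (y >>> 5)) &&& 16777215) := by
  apply Nat.eq_of_testBit_eq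
  intro i
  simp [Nat.testBit_and, Nat.testBit_xor, Nat.testBit_shiftRight]
  cases hx : x.testBit i <;> cases hy : y.testBit i <;>
    cases hx2 : x.testBit (5 + i) <;> cases hy2 : y.testBit (5 + i) <;> simp_all
theorem altStep_xor (x y : Nat) : altStep (x ^^^ y) = altStep x ^^^ altStep y := by
  unfold altStep
  simp only [stageL_lin 6, stageR_lin, stageL_lin 11]
theorem altStep_lt (v : Nat) : altStep v < 16777216 := by
  have h : ∀ x : Nat, x &&& 16777215 < 16777216 :=
    fun x => lt_of_le_of_lt Nat.and_le_right (by norm_num)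
  exact h _

theorem getD_map_range (f : Nat → Nat) (n i : Nat) (h : i < n) :
    ((List.range n).map f).getD i 0 = f i := by
  simp [List.getD, List.getElem?_map, List.getElem?_range h]

theorem altApply_eq_appk (m : List Nat) (v : Nat) : altApply m v = appk m v 24 := by
  unfold altApply appk
  congr 1
  funext r i
  rw [cond_eq]

theorem altApply_xor (m : List Nat) (x y : Nat) :
    altApply m (x ^^^ y) = altApply m x ^^^ altApply m y := by
  simp [altApply_eq_appk, appk_xor]

theorem altApply_zero (m : List Nat) : altApply m 0 = 0 := by
  simp [altApply_eq_appk, appk_zero_v]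

theorem xor_two_pow_of_lt {a k : Nat} (h : a < 2 ^ k) : a ^^^ 2 ^ k = a + 2 ^ k := by
  apply Nat.eq_of_testBit_eq
  intro i
  rcases Nat.lt_trichotomy i k with hi|hi|hi
  · simp [Nat.testBit_xor, Nat.testBit_two_pow, Nat.ne_of_gt hi, Nat.add_comm a (2^k),
      Nat.testBit_two_pow_add_gt hi]
  · subst hi
    simp [Nat.testBit_xor, Nat.add_comm a (2^i), Nat.testBit_two_pow_add_eq,
      Nat.testBit_lt_two_pow h]
  · have h1 : a + 2 ^ k < 2 ^ i := by
      have : 2 ^ (k+1) ≤ 2 ^ i := Nat.pow_le_pow_right (by norm_num) hi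
      omega
    simp [Nat.testBit_xor, Nat.testBit_two_pow, Nat.ne_of_lt hi,
      Nat.testBit_lt_two_pow (Nat.lt_of_lt_of_le h (Nat.pow_le_pow_right (by norm_num) hi.le)),
      Nat.testBit_lt_two_pow h1]
theorem split_low (v k : Nat) (h : v < 2 ^ (k + 1)) :
    v = (v % 2 ^ k) ^^^ (if v.testBit k then 2 ^ k else 0) := by
  have hm : v % 2 ^ k < 2 ^ k := Nat.mod_lt _ (by positivity)
  have hd : v / 2 ^ k < 2 := by
    rw [Nat.div_lt_iff_lt_mul (by positivity)]
    omega
  have hv : 2 ^ k * (v / 2 ^ k) + v % 2 ^ k = v := Nat.div_add_mod v (2 ^ k)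
  cases ht : v.testBit k
  · rw [Nat.testBit_eq_decide_div_mod_eq] at ht
    simp only [decide_eq_false_iff_not] at ht
    have h0 : v / 2 ^ k = 0 := by
      generalize hx : v / 2 ^ k = x at ht hd
      omega
    rw [h0] at hv
    simp only [Bool.false_eq_true, if_false, Nat.xor_zero]
    omega
  · rw [Nat.testBit_eq_decide_div_mod_eq] at ht
    simp only [decide_eq_true_eq] at ht
    have h1 : v / 2 ^ k = 1 := by
      generalize hx : v / 2 ^ k = x at ht hd
      omega
    rw [if_pos rfl, xor_two_pow_of_lt hm]
    rw [h1] at hv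
    omega


theorem base_sem_aux (k : Nat) (hk : k ≤ 24) :
    ∀ v, v < 2 ^ k → appk ((List.range 24).map (fun i => altStep (1 <<< i))) v 24 = altStep v := by
  induction k with
  | zero =>
    intro v hv
    have : v = 0 := by omega
    subst this
    rw [appk_zero_v]
    rfl
  | succ k ih =>
    intro v hv
    have hv' := split_low v k hv
    rw [hv', appk_xor, altStep_xor, ih (by omega) _ (Nat.mod_lt _ (by positivity))]
    congr 1
    cases ht : v.testBit k
    · simp only [Bool.false_eq_true, if_false]
      rw [appk_zero_v]; rfl
    · rw [if_pos rfl, appk_two_pow, if_pos (by omega), getD_map_range _ _ _ (by omega)]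
      congr 1
      rw [Nat.shiftLeft_eq, Nat.one_mul]

theorem id_sem_aux (k : Nat) (hk : k ≤ 24) :
    ∀ v, appk ((List.range 24).map (fun i => (1 : Nat) <<< i)) v k = v % 2 ^ k := by
  induction k with
  | zero => intro v; simp [appk, Nat.mod_one]
  | succ k ih =>
    intro v
    have hsplit := split_low (v % 2 ^ (k + 1)) k (Nat.mod_lt _ (by positivity))
    rw [Nat.mod_mod_of_dvd _ (pow_dvd_pow 2 (by omega)),
        Nat.testBit_mod_two_pow] at hsplit
    simp only [show k < k + 1 by omega, decide_true, Bool.true_and] at hsplit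
    rw [appk_succ, ih (by omega)]
    cases ht : v.testBit k
    · simp only [Bool.false_eq_true, if_false]
      rw [ht] at hsplit
      simpa using hsplit.symm
    · simp only [if_pos rfl]
      rw [ht] at hsplit
      rw [getD_map_range _ _ _ (by omega), Nat.shiftLeft_eq, Nat.one_mul]
      simpa using hsplit.symm

theorem base_sem (v : Nat) (hv : v < 16777216) :
    altApply ((List.range 24).map (fun i => altStep (1 <<< i))) v = altStep v := by
  rw [altApply_eq_appk]
  exact base_sem_aux 24 le_rfl v hv

theorem id_sem (v : Nat) (hv : v < 16777216) :
    altApply ((List.range 24).map (fun i => (1 : Nat) <<< i)) v = v := by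
  rw [altApply_eq_appk, id_sem_aux 24 le_rfl v]
  exact Nat.mod_eq_of_lt hv

theorem appk_map (a b : List Nat) (hb : b.length = 24) (v : Nat) (k : Nat) (hk : k ≤ 24) :
    appk (b.map (fun c => altApply a c)) v k = altApply a (appk b v k) := by
  induction k with
  | zero => simp [appk, altApply_zero]
  | succ k ih =>
    rw [appk_succ, appk_succ, ih (by omega)]
    cases ht : v.testBit k
    · simp
    · simp [List.getD, List.getElem?_map, List.getElem?_eq_getElem (show k < b.length by omega), altApply_xor]

theorem matmul_sem (a b : List Nat) (hb : b.length = 24) (v : Nat) :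
    altApply (altMatmul a b) v = altApply a (altApply b v) := by
  rw [altApply_eq_appk, altApply_eq_appk (m := b)]
  unfold altMatmul
  exact appk_map a b hb v 24 le_rfl

theorem matmul_len (a b : List Nat) : (altMatmul a b).length = b.length := by
  simp [altMatmul]

theorem powloop_sem (e : Nat) (B P : List Nat) (g r : Nat → Nat)
    (hB : B.length = 24) (hP : P.length = 24)
    (hgB : ∀ v, v < 16777216 → altApply B v = g v)
    (hrP : ∀ v, v < 16777216 → altApply P v = r v)
    (hg : ∀ v, v < 16777216 → g v < 16777216)
    (hr : ∀ v, v < 16777216 → r v < 16777216) :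
    ∀ v, v < 16777216 → altApply (altPowLoop B P e) v = g^[e] (r v) := by
  induction e using Nat.strong_induction_on generalizing B P g r with
  | _ e ih =>
    intro v hv
    rw [altPowLoop]
    by_cases he : e = 0
    · simp only [he, if_pos rfl]
      simp [hrP v hv]
    · rw [if_neg he]
      have hdiv : e >>> 1 = e / 2 := by simp [Nat.shiftRight_eq_div_pow]
      have hlt : e >>> 1 < e := by rw [hdiv]; omega
      have hmod : (e &&& 1 == 1) = decide (e % 2 = 1) := by
        rw [Nat.and_one_is_mod]
        cases h : decide (e % 2 = 1) <;> simp_all <;> omega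
      have hP' : (if e &&& 1 == 1 then altMatmul B P else P).length = 24 := by
        split <;> simp [matmul_len, hP]
      have hr' : ∀ w, w < 16777216 →
          altApply (if e &&& 1 == 1 then altMatmul B P else P) w = g^[e % 2] (r w) := by
        intro w hw
        by_cases hpar : e % 2 = 1
        · have hcond : (e &&& 1 == 1) = true := by rw [hmod]; simp [hpar]
          rw [if_pos hcond, matmul_sem B P hP, hrP w hw, hgB _ (hr w hw)]
          simp [hpar]
        · have h0 : e % 2 = 0 := by omega
          have hcond : ¬ ((e &&& 1 == 1) = true) := by rw [hmod]; simp [h0]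
          rw [if_neg hcond, hrP w hw, h0]
          simp
      have hrange' : ∀ w, w < 16777216 → g^[e % 2] (r w) < 16777216 := by
        intro w hw
        by_cases hpar : e % 2 = 1
        · simp only [hpar, Function.iterate_one]
          exact hg _ (hr w hw)
        · have : e % 2 = 0 := by omega
          simp only [this, Function.iterate_zero, id]
          exact hr w hw
      have hBB : ∀ w, w < 16777216 → altApply (altMatmul B B) w = g (g w) := by
        intro w hw
        rw [matmul_sem B B hB, hgB w hw, hgB _ (hg w hw)]
      have hBBr : ∀ w, w < 16777216 → g (g w) < 16777216 := fun w hw => hg _ (hg w hw)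
      rw [ih _ hlt (altMatmul B B) _ (fun w => g (g w)) (fun w => g^[e % 2] (r w))
            (by rw [matmul_len, hB]) hP' hBB hr' hBBr hrange' v hv]
      calc (fun w => g (g w))^[e >>> 1] (g^[e % 2] (r v))
          = (g^[2])^[e >>> 1] (g^[e % 2] (r v)) := by
              have h2 : g^[2] = g ∘ g := by
                funext z; simp [Function.iterate_succ_apply, Function.comp]
              rw [h2]; rfl
        _ = g^[2 * (e >>> 1)] (g^[e % 2] (r v)) := by rw [← Function.iterate_mul]
        _ = g^[2 * (e >>> 1) + e % 2] (r v) := by rw [← Function.iterate_add_apply]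
        _ = g^[e] (r v) := by rw [hdiv]; congr 1; omega

-- ==== A-side bridge: A's Python-int update equals altStep on the low 24 bits ====

def aStep (n : Int) : Int :=
  let n1 := PySem.Int.mod (PySem.Int.bxor n (n * 64)) 16777216
  let n2 := PySem.Int.mod (PySem.Int.bxor n1 (PySem.Int.floordiv n1 32)) 16777216
  PySem.Int.mod (PySem.Int.bxor n2 (n2 * 2048)) 16777216

theorem stage1_of_bits (a r : Nat) (h : ∀ i, i < 24 → r.testBit i = a.testBit i) :
    (a ^^^ a * 64) % 16777216 = (r ^^^ (r <<< 6)) &&& 16777215 := by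
  have h64 : a * 64 = a <<< 6 := by rw [Nat.shiftLeft_eq]
  have hmask : (16777215 : Nat) = 2 ^ 24 - 1 := by norm_num
  have hmod : (16777216 : Nat) = 2 ^ 24 := by norm_num
  rw [h64, hmask, hmod, Nat.and_two_pow_sub_one_eq_mod]
  apply Nat.eq_of_testBit_eq
  intro i
  by_cases hi : i < 24
  · simp only [Nat.testBit_mod_two_pow, hi, decide_true, Bool.true_and,
      Nat.testBit_xor, Nat.testBit_shiftLeft, h i hi]
    by_cases h6 : 6 ≤ i
    · simp only [h6, decide_true, Bool.true_and, h (i - 6) (by omega)]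
    · simp only [h6, decide_false, Bool.false_and, Bool.xor_false]
  · simp only [Nat.testBit_mod_two_pow, hi, decide_false, Bool.false_and]

theorem stage1_of_bits_neg (a r : Nat) (h : ∀ i, i < 24 → r.testBit i = !a.testBit i) :
    (a ^^^ (64 * a + 63)) % 16777216 = (r ^^^ (r <<< 6)) &&& 16777215 := by
  have h64 : 64 * a + 63 = 2 ^ 6 * a + 63 := by norm_num
  have hmask : (16777215 : Nat) = 2 ^ 24 - 1 := by norm_num
  have hmod : (16777216 : Nat) = 2 ^ 24 := by norm_num
  rw [h64, hmask, hmod, Nat.and_two_pow_sub_one_eq_mod]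
  apply Nat.eq_of_testBit_eq
  intro i
  by_cases hi : i < 24
  · simp only [Nat.testBit_mod_two_pow, hi, decide_true, Bool.true_and,
      Nat.testBit_xor, Nat.testBit_shiftLeft,
      Nat.testBit_two_pow_mul_add a (by norm_num : (63:Nat) < 2 ^ 6) i, h i hi]
    by_cases h6 : i < 6
    · have h63 : (63 : Nat) = 2 ^ 6 - 1 := by norm_num
      simp only [if_pos h6, h63, Nat.testBit_two_pow_sub_one, h6, decide_true,
        show ¬ (6 ≤ i) by omega, decide_false, Bool.false_and, Bool.xor_false, Bool.xor_true]
      cases a.testBit i <;> simp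
    · simp only [if_neg h6, show 6 ≤ i by omega, decide_true, Bool.true_and,
        h (i - 6) (by omega)]
      cases a.testBit i <;> cases a.testBit (i - 6) <;> rfl
  · simp only [Nat.testBit_mod_two_pow, hi, decide_false, Bool.false_and]

theorem tail2 (w : Nat) :
    PySem.Int.mod (PySem.Int.bxor (↑w) (PySem.Int.floordiv (↑w) 32)) 16777216
      = ((((w ^^^ (w >>> 5)) &&& 16777215) : Nat) : Int) := by
  have h32 : (32 : Int) = ((32 : Nat) : Int) := by norm_num
  have hM : (16777216 : Int) = ((16777216 : Nat) : Int) := by norm_num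
  rw [h32, hM, PySem.Int.floordiv_natCast, PySem.Int.bxor_natCast, PySem.Int.mod_natCast]
  congr 1
  rw [Nat.shiftRight_eq_div_pow]
  have : (16777215 : Nat) = 2 ^ 24 - 1 := by norm_num
  rw [this, Nat.and_two_pow_sub_one_eq_mod]
theorem tail3 (w : Nat) :
    PySem.Int.mod (PySem.Int.bxor (↑w) (↑w * 2048)) 16777216
      = ((((w ^^^ (w <<< 11)) &&& 16777215) : Nat) : Int) := by
  have h2048 : ((w : Int) * 2048) = ((w * 2048 : Nat) : Int) := by push_cast; ring
  have hM : (16777216 : Int) = ((16777216 : Nat) : Int) := by norm_num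
  rw [h2048, hM, PySem.Int.bxor_natCast, PySem.Int.mod_natCast]
  congr 1
  rw [Nat.shiftLeft_eq]
  have : (16777215 : Nat) = 2 ^ 24 - 1 := by norm_num
  rw [this, Nat.and_two_pow_sub_one_eq_mod]

set_option maxRecDepth 4096 in
theorem aStep_bridge (n : Int) :
    aStep n = ((altStep ((PySem.Int.mod n 16777216).toNat) : Nat) : Int) := by
  have hMpos : (0 : Int) < 16777216 := by norm_num
  have hmn : PySem.Int.mod n 16777216 = n % 16777216 := PySem.Int.mod_eq_emod_of_pos hMpos
  set r : Nat := (PySem.Int.mod n 16777216).toNat with hrdef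
  have hrval : PySem.Int.mod n 16777216 = (r : Int) := by
    rw [hrdef, Int.toNat_of_nonneg (PySem.Int.mod_nonneg n (by norm_num))]
  have hrlt : r < 16777216 := by
    have := PySem.Int.mod_lt n (b := 16777216) (by norm_num)
    omega
  show PySem.Int.mod (PySem.Int.bxor _ _) _ = _
  by_cases hn : 0 ≤ n
  · -- n = ↑a
    obtain ⟨a, rfl⟩ : ∃ a : Nat, n = (a : Int) := ⟨n.toNat, (Int.toNat_of_nonneg hn).symm⟩
    have hra : r = a % 16777216 := by
      have : PySem.Int.mod (a : Int) 16777216 = ((a % 16777216 : Nat) : Int) := by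
        have hM : (16777216 : Int) = ((16777216 : Nat) : Int) := by norm_num
        rw [hM, PySem.Int.mod_natCast]
      omega
    have hbits : ∀ i, i < 24 → r.testBit i = a.testBit i := by
      intro i hi
      rw [hra, show (16777216 : Nat) = 2 ^ 24 by norm_num, Nat.testBit_mod_two_pow]
      simp [hi]
    have h1 : PySem.Int.mod (PySem.Int.bxor (↑a) (↑a * 64)) 16777216
        = (((r ^^^ (r <<< 6)) &&& 16777215 : Nat) : Int) := by
      have h64 : ((a : Int) * 64) = ((a * 64 : Nat) : Int) := by push_cast; ring
      have hM : (16777216 : Int) = ((16777216 : Nat) : Int) := by norm_num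
      rw [h64, hM, PySem.Int.bxor_natCast, PySem.Int.mod_natCast,
        stage1_of_bits a r hbits]
    rw [h1, tail2, tail3]
    rfl
  · -- n = -(↑a + 1)
    obtain ⟨a, rfl⟩ : ∃ a : Nat, n = -((a : Int) + 1) := by
      refine ⟨(-n - 1).toNat, ?_⟩
      have : ((-n - 1).toNat : Int) = -n - 1 := Int.toNat_of_nonneg (by omega)
      omega
    have hbx : PySem.Int.bxor (-((a : Int) + 1)) (-((a : Int) + 1) * 64)
        = ((a ^^^ (64 * a + 63) : Nat) : Int) := by
      have e1 : (-(-((a : Int) + 1)) - 1).toNat = a := by omega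
      have e2 : (-(-((a : Int) + 1) * 64) - 1).toNat = 64 * a + 63 := by omega
      rw [PySem.Int.bxor, if_neg (by omega), if_neg (by omega), e1, e2]
    have hra : (((16777216 - ((a % 16777216) + 1)) : Nat) : Int) = PySem.Int.mod (-((a : Int) + 1)) 16777216 := by
      rw [PySem.Int.mod_eq_emod_of_pos hMpos]
      have h1 : ((a : Int) % 16777216) = ((a % 16777216 : Nat) : Int) := by push_cast; rfl
      have h2 : (a % 16777216) < 16777216 := Nat.mod_lt _ (by norm_num)
      have h3 : (-((a : Int) + 1)) % 16777216 = 16777216 - (((a % 16777216 : Nat) : Int) + 1) := by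
        omega
      rw [h3]
      push_cast [Nat.sub_add_cancel]
      omega
    have hrval' : r = 16777216 - ((a % 16777216) + 1) := by
      have := hrval
      omega
    have hbits : ∀ i, i < 24 → r.testBit i = !a.testBit i := by
      intro i hi
      rw [hrval', show (16777216 : Nat) = 2 ^ 24 by norm_num,
        Nat.testBit_two_pow_sub_succ (Nat.mod_lt _ (by positivity)) i]
      have hmm : (a % 16777216).testBit i = a.testBit i := by
        rw [show (16777216 : Nat) = 2 ^ 24 by norm_num, Nat.testBit_mod_two_pow]
        simp [hi]
      simp [hi, hmm]
    have h1 : PySem.Int.mod (PySem.Int.bxor (-((a : Int) + 1)) (-((a : Int) + 1) * 64)) 16777216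
        = (((r ^^^ (r <<< 6)) &&& 16777215 : Nat) : Int) := by
      have hM : (16777216 : Int) = ((16777216 : Nat) : Int) := by norm_num
      rw [hbx, hM, PySem.Int.mod_natCast, stage1_of_bits_neg a r hbits]
    rw [h1, tail2, tail3]
    rfl

theorem aStep_cast (x : Nat) (hx : x < 16777216) :
    aStep (x : Int) = ((altStep x : Nat) : Int) := by
  rw [aStep_bridge]
  congr 2
  rw [show (16777216 : Int) = ((16777216 : Nat) : Int) by norm_num, PySem.Int.mod_natCast]
  omega

theorem aStep_iterate (k : Nat) (n : Int) :
    aStep^[k + 1] n = ((altStep^[k + 1] ((PySem.Int.mod n 16777216).toNat) : Nat) : Int) := by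
  induction k with
  | zero => simpa using aStep_bridge n
  | succ k ih =>
    rw [Function.iterate_succ_apply', ih, aStep_cast _ ?h,
      ← Function.iterate_succ_apply' altStep (k + 1) ((PySem.Int.mod n 16777216).toNat)]
    case h =>
      have h1 : altStep^[k] (altStep ((PySem.Int.mod n 16777216).toNat)) < 16777216 := by
        cases k with
        | zero => exact altStep_lt _
        | succ m => rw [Function.iterate_succ_apply']; exact altStep_lt _
      rw [Function.iterate_succ_apply]
      exact h1

theorem foldl_const {α β : Type} (l : List α) (f : β → β) (x : β) :
    l.foldl (fun m _ => f m) x = f^[l.length] x := by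
  induction l generalizing x with
  | nil => rfl
  | cons a l ih => simp [List.foldl_cons, ih, Function.iterate_succ_apply]

theorem simulate_eq (n : Int) :
    part_one_simulate n 2000 = ((altStep^[2000] ((PySem.Int.mod n 16777216).toNat) : Nat) : Int) := by
  have hlen : (PySem.List.pyRange 0 2000 1).length = 2000 := by
    rw [show (2000 : Int) = ((2000 : Nat) : Int) by norm_num, PySem.List.pyRange_zero_natCast]
    simp
  have h := foldl_const (PySem.List.pyRange 0 2000 1) aStep n
  rw [hlen] at h
  have h2 : part_one_simulate n 2000 = aStep^[2000] n := h
  rw [h2, show (2000 : Nat) = 1999 + 1 by norm_num, aStep_iterate]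

theorem alt_seed (v : Nat) (hv : v < 16777216) :
    altApply (altPowLoop ((List.range 24).map (fun i => altStep (1 <<< i)))
        ((List.range 24).map (fun i => (1 : Nat) <<< i)) 2000) v = altStep^[2000] v := by
  exact powloop_sem 2000 _ _ altStep (fun w => w)
    (by rw [List.length_map, List.length_range]) (by rw [List.length_map, List.length_range])
    base_sem id_sem (fun w _ => altStep_lt w) (fun w hw => hw) v hv

-- ===== VERDICT (by name: the statement is the Claim_ definition above) =====
theorem part_one_spec : Claim_equal_part_one := by
  intro inp _
  show (inp.map (fun n => part_one_simulate n 2000)).sum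
      = (inp.map (fun n =>
          ((altApply (altPowLoop ((List.range 24).map (fun i => altStep (1 <<< i)))
              ((List.range 24).map (fun i => (1 : Nat) <<< i)) 2000)
            ((PySem.Int.mod n 16777216).toNat) : Nat) : Int))).sum
  have hmap : ∀ n : Int, part_one_simulate n 2000
      = ((altApply (altPowLoop ((List.range 24).map (fun i => altStep (1 <<< i)))
          ((List.range 24).map (fun i => (1 : Nat) <<< i)) 2000)
          ((PySem.Int.mod n 16777216).toNat) : Nat) : Int) := by
    intro n
    have h1 := PySem.Int.mod_lt n (b := 16777216) (by norm_num)
    have h2 := PySem.Int.mod_nonneg n (b := 16777216) (by norm_num)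
    have hv : (PySem.Int.mod n 16777216).toNat < 16777216 := by omega
    rw [simulate_eq, ← alt_seed _ hv]
  exact congrArg (fun f => (inp.map f).sum) (funext hmap)
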